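-- pv_equiv track=rewrite | github.com/shriram7057/GFG-POTD-Mastery | Next element with greater frequency.py | nextFreqGreater
-- ===== SOURCE A (Python) =====
-- def nextFreqGreater(arr):
--     # code here
--     from collections import Counter
--     freq = Counter(arr)
--     stack = []
--     n = len(arr)
--     res = [-1] * n
--
--     for i in range(n):
--         while stack and freq[arr[stack[-1]]] < freq[arr[i]]:
--             res[stack.pop()] = arr[i]
--         stack.append(i)
--     return res
-- ===== SOURCE B (Python) =====
-- def nextFreqGreater(arr):
--     # Direct nested forward scan instead of a monotonic stack:
--     # res[i] = first arr[j] (j > i) whose frequency is strictly greater.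
--     from collections import Counter
--     freq = Counter(arr)
--     n = len(arr)
--     res = []
--     for i in range(n):
--         out = -1
--         for j in range(i + 1, n):
--             if freq[arr[j]] > freq[arr[i]]:
--                 out = arr[j]
--                 break
--         res.append(out)
--     return res
-- ===== Notes on version B (the rewrite author's own statement) =====
-- stated objective: simpler
-- what changed: Replaced the single-pass monotonic index stack (popping and back-filling res) with a direct nested forward scan: for each i, take the first later element whose frequency is strictly greater, else -1.
import Mathlib
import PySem

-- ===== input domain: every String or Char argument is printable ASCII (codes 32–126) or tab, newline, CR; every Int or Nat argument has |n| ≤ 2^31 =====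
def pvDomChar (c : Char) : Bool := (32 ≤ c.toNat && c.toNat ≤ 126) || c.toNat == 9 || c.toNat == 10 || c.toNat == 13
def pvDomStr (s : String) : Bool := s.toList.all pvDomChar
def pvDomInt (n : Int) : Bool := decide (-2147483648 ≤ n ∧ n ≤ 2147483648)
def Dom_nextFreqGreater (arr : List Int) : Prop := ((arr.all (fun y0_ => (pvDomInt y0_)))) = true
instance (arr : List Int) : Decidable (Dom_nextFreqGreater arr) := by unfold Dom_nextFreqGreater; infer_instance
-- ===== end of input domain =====

-- B replaces A's monotonic-stack single pass by a plain nested forward scan.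

-- ===== PORT A =====
-- the inner `while stack and freq[arr[stack[-1]]] < freq[arr[i]]: res[stack.pop()] = arr[i]`;
-- the stack is kept head-first (head = Python stack[-1]); indices come from range(n) so they
-- are nonnegative and in range: arr.getD j 0 is exact for Python arr[j] here.
def nfgPop (c : Int → Int) (arr : List Int) (i : Nat) :
    List Nat → List Int → List Nat × List Int
  | [], res => ([], res)
  | t :: rest, res =>
    if c (arr.getD t 0) < c (arr.getD i 0) then
      nfgPop c arr i rest (res.set t (arr.getD i 0))
    else (t :: rest, res)

-- one iteration of `for i in range(n)` (pop loop, then stack.append(i))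
def nfgStep (c : Int → Int) (arr : List Int) (st : List Nat × List Int) (i : Nat) :
    List Nat × List Int :=
  let p := nfgPop c arr i st.1 st.2
  (i :: p.1, p.2)

def nextFreqGreater (arr : List Int) : List Int :=
  let freq := PySem.Dict.counter arr        -- freq = Counter(arr); freq[x] = getD x 0
  let n := arr.length
  let res := List.replicate n (-1 : Int)    -- res = [-1] * n
  ((List.range n).foldl (nfgStep (fun x => freq.getD x 0) arr) ([], res)).2

-- ===== PORT B =====
-- inner `for j in range(i+1, n): if freq[arr[j]] > freq[arr[i]]: out = arr[j]; break` (else -1)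
def nfgScan (c : Int → Int) (arr : List Int) (ki : Int) : List Nat → Int
  | [] => -1
  | j :: js => if c (arr.getD j 0) > ki then arr.getD j 0 else nfgScan c arr ki js

def nextFreqGreater_alt (arr : List Int) : List Int :=
  let freq := PySem.Dict.counter arr
  let c := fun x => freq.getD x 0
  let n := arr.length
  (List.range n).map (fun i => nfgScan c arr (c (arr.getD i 0)) (List.range' (i+1) (n - (i+1))))

-- ===== PRECONDITION & SPEC =====
def Spec_nextFreqGreater (arr : List Int) (out : List Int) : Prop := out = nextFreqGreater_alt arr
instance (arr : List Int) (out : List Int) : Decidable (Spec_nextFreqGreater arr out) := by unfold Spec_nextFreqGreater; infer_instance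

-- ===== CLAIM (what is proved, stated in full; the proofs are below) =====
def Claim_equal_nextFreqGreater : Prop := ∀ (arr : List Int), Dom_nextFreqGreater arr → Spec_nextFreqGreater arr (nextFreqGreater arr)

-- ===== LEMMAS AND PROOFS =====

-- key of index j (its element's frequency)
def nfgKey (c : Int → Int) (arr : List Int) (j : Nat) : Int := c (arr.getD j 0)

-- the stack contents after processing range m (mirrors the step's action on the stack)
def nfgS (c : Int → Int) (arr : List Int) : Nat → List Nat
  | 0 => []
  | m + 1 => m :: (nfgS c arr m).dropWhile (fun j => nfgKey c arr j < nfgKey c arr m)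

-- intended res entry for index i after m steps
def nfgG (c : Int → Int) (arr : List Int) (m i : Nat) : Int :=
  nfgScan c arr (nfgKey c arr i) (List.range' (i+1) (m - (i+1)))

lemma nfg_range'_snoc (s k : Nat) : List.range' s (k+1) = List.range' s k ++ [s + k] := by
  induction k generalizing s with
  | zero => simp [List.range']
  | succ k ih =>
    rw [List.range'_succ, ih (s+1), List.range'_succ]
    have h : s + 1 + k = s + (k + 1) := by omega
    simp [h]

lemma nfgPop_eq (c : Int → Int) (arr : List Int) (i : Nat) :
    ∀ (st : List Nat) (res : List Int),
      nfgPop c arr i st res =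
        (st.dropWhile (fun j => decide (nfgKey c arr j < nfgKey c arr i)),
         (st.takeWhile (fun j => decide (nfgKey c arr j < nfgKey c arr i))).foldl
            (fun r t => r.set t (arr.getD i 0)) res) := by
  intro st
  induction st with
  | nil => intro res; simp [nfgPop]
  | cons t rest ih =>
    intro res
    simp only [nfgPop, nfgKey, List.dropWhile_cons, List.takeWhile_cons, decide_eq_true_eq]
    split_ifs with h
    · rw [ih]; simp [nfgKey]
    · simp

lemma nfgS_lt (c : Int → Int) (arr : List Int) :
    ∀ m, ∀ j ∈ nfgS c arr m, j < m := by
  intro m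
  induction m with
  | zero => simp [nfgS]
  | succ m ih =>
    intro j hj
    simp only [nfgS, List.mem_cons] at hj
    rcases hj with rfl | h
    · omega
    · have := ih j (List.dropWhile_sublist _ |>.subset h); omega

-- all elements surviving the dropWhile have key ≥ b
lemma nfg_dropWhile_ge (c : Int → Int) (arr : List Int) (b : Int) :
    ∀ (L : List Nat), L.Pairwise (fun a d => nfgKey c arr a ≤ nfgKey c arr d) →
      ∀ j ∈ L.dropWhile (fun j => decide (nfgKey c arr j < b)), b ≤ nfgKey c arr j := by
  intro L
  induction L with
  | nil => simp
  | cons a L ih =>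
    intro hp j hj
    by_cases h : nfgKey c arr a < b
    · exact ih hp.tail j (by simpa [List.dropWhile_cons, h] using hj)
    · simp only [List.dropWhile_cons, decide_eq_true_eq, h, if_false, List.mem_cons] at hj
      rcases hj with rfl | hj
      · omega
      · have := (List.pairwise_cons.mp hp).1 j hj; omega

-- stack keys are non-decreasing head → tail
lemma nfgS_pairwise (c : Int → Int) (arr : List Int) :
    ∀ m, (nfgS c arr m).Pairwise (fun a b => nfgKey c arr a ≤ nfgKey c arr b) := by
  intro m
  induction m with
  | zero => simp [nfgS]
  | succ m ih =>
    refine List.Pairwise.cons ?_ (List.Pairwise.sublist (List.dropWhile_sublist _) ih)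
    intro j hj
    exact nfg_dropWhile_ge c arr (nfgKey c arr m) (nfgS c arr m) ih j hj

-- no later index (below m) has a strictly greater key than a stack member
lemma nfgS_noGreater (c : Int → Int) (arr : List Int) :
    ∀ m, ∀ j ∈ nfgS c arr m, ∀ l, j < l → l < m → nfgKey c arr l ≤ nfgKey c arr j := by
  intro m
  induction m with
  | zero => simp [nfgS]
  | succ m ih =>
    intro j hj l hjl hlm
    simp only [nfgS, List.mem_cons] at hj
    rcases hj with rfl | hj
    · omega
    · have hjS : j ∈ nfgS c arr m := List.dropWhile_sublist _ |>.subset hj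
      rcases Nat.lt_or_ge l m with h | h
      · exact ih j hjS l hjl h
      · have hl : l = m := by omega
        subst hl
        exact nfg_dropWhile_ge c arr (nfgKey c arr l) (nfgS c arr l) (nfgS_pairwise c arr l) j hj

-- indices below m not on the stack already saw a strictly greater key
lemma nfgS_complete (c : Int → Int) (arr : List Int) :
    ∀ m, ∀ j, j < m → j ∉ nfgS c arr m →
      ∃ l, j < l ∧ l < m ∧ nfgKey c arr j < nfgKey c arr l := by
  intro m
  induction m with
  | zero => omega
  | succ m ih =>
    intro j hj hnot
    simp only [nfgS, List.mem_cons, not_or] at hnot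
    obtain ⟨hne, hnd⟩ := hnot
    have hjm : j < m := by omega
    by_cases hjS : j ∈ nfgS c arr m
    · -- j was popped at step m: it sits in the takeWhile part, so its key is < key m
      have : j ∈ (nfgS c arr m).takeWhile (fun j => decide (nfgKey c arr j < nfgKey c arr m)) := by
        have hsplit := List.takeWhile_append_dropWhile
          (p := fun j => decide (nfgKey c arr j < nfgKey c arr m)) (l := nfgS c arr m)
        rw [← hsplit] at hjS
        rcases List.mem_append.mp hjS with h | h
        · exact h
        · exact absurd h hnd
      have := List.mem_takeWhile_imp this
      exact ⟨m, hjm, by omega, by simpa using this⟩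
    · obtain ⟨l, h1, h2, h3⟩ := ih j hjm hjS
      exact ⟨l, h1, by omega, h3⟩

lemma nfg_map_range_set (n : Nat) (g : Nat → Int) (t : Nat) (x : Int) (_ht : t < n) :
    ((List.range n).map g).set t x = (List.range n).map (fun j => if j = t then x else g j) := by
  apply List.ext_getElem
  · simp
  · intro i h1 h2
    simp only [List.length_map, List.length_range] at h1 h2
    simp only [List.getElem_set, List.getElem_map, List.getElem_range]
    rcases eq_or_ne t i with rfl | h
    · simp
    · simp [h, Ne.symm h]

lemma nfg_setfold (x : Int) (n : Nat) :
    ∀ (T : List Nat) (g : Nat → Int), (∀ t ∈ T, t < n) →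
      T.foldl (fun r t => r.set t x) ((List.range n).map g) =
        (List.range n).map (fun j => if j ∈ T then x else g j) := by
  intro T
  induction T with
  | nil => intro g _; simp
  | cons t T' ih =>
    intro g h
    simp only [List.foldl_cons]
    rw [nfg_map_range_set n g t x (h t (List.mem_cons_self ..)),
        ih _ (fun t' ht' => h t' (List.mem_cons_of_mem _ ht'))]
    congr 1
    funext j
    by_cases h1 : j ∈ T' <;> by_cases h2 : j = t <;> simp [h1, h2]

lemma nfgScan_append_fail (c : Int → Int) (arr : List Int) (ki : Int) :
    ∀ (L1 L2 : List Nat), (∀ l ∈ L1, ¬ ki < c (arr.getD l 0)) →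
      nfgScan c arr ki (L1 ++ L2) = nfgScan c arr ki L2 := by
  intro L1
  induction L1 with
  | nil => simp
  | cons a L ih =>
    intro L2 h
    have ha : ¬ c (arr.getD a 0) > ki := h a (List.mem_cons_self ..)
    simp only [List.cons_append, nfgScan, if_neg ha]
    exact ih L2 (fun l hl => h l (List.mem_cons_of_mem _ hl))

lemma nfgScan_append_found (c : Int → Int) (arr : List Int) (ki : Int) :
    ∀ (L1 L2 : List Nat), (∃ l ∈ L1, ki < c (arr.getD l 0)) →
      nfgScan c arr ki (L1 ++ L2) = nfgScan c arr ki L1 := by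
  intro L1
  induction L1 with
  | nil => simp
  | cons a L ih =>
    intro L2 h
    by_cases ha : c (arr.getD a 0) > ki
    · simp only [List.cons_append, nfgScan, if_pos ha]
    · simp only [List.cons_append, nfgScan, if_neg ha]
      apply ih
      rcases h with ⟨l, hl, hkl⟩
      rcases List.mem_cons.mp hl with rfl | hl
      · exact absurd hkl ha
      · exact ⟨l, hl, hkl⟩

-- the main loop invariant: after m steps the state is (nfgS m, pointwise nfgG m)
lemma nfg_inv (c : Int → Int) (arr : List Int) (n : Nat) :
    ∀ m, m ≤ n →
      (List.range m).foldl (nfgStep c arr) ([], List.replicate n (-1 : Int)) =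
        (nfgS c arr m, (List.range n).map (nfgG c arr m)) := by
  intro m
  induction m with
  | zero =>
    intro _
    simp only [List.range_zero, List.foldl_nil, nfgS]
    rw [Prod.mk.injEq]
    refine ⟨rfl, ?_⟩
    apply List.ext_getElem
    · simp
    · intro i h1 h2
      simp [nfgG, nfgScan]
  | succ m ih =>
    intro hmn
    rw [List.range_succ, List.foldl_append, ih (by omega), List.foldl_cons, List.foldl_nil]
    simp only [nfgStep, nfgPop_eq]
    rw [Prod.mk.injEq]
    refine ⟨rfl, ?_⟩
    -- the res component
    rw [nfg_setfold (arr.getD m 0) n _ (nfgG c arr m)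
        (fun t ht => by
          have := nfgS_lt c arr m t (List.takeWhile_sublist _ |>.subset ht); omega)]
    congr 1
    funext j
    symm
    by_cases hjn : j < m
    · have hsplit : List.range' (j+1) (m + 1 - (j+1)) =
          List.range' (j+1) (m - (j+1)) ++ [m] := by
        have h1 : m + 1 - (j+1) = (m - (j+1)) + 1 := by omega
        have h2 : j + 1 + (m - (j+1)) = m := by omega
        rw [h1, nfg_range'_snoc, h2]
      have hfailpre : ∀ hyp : j ∈ nfgS c arr m,
          ∀ l ∈ List.range' (j+1) (m - (j+1)), ¬ nfgKey c arr j < c (arr.getD l 0) := by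
        intro hyp l hl
        have := List.mem_range'_1.mp hl
        have := nfgS_noGreater c arr m j hyp l (by omega) (by omega)
        simp only [nfgKey] at this ⊢
        omega
      by_cases hT : j ∈ (nfgS c arr m).takeWhile
          (fun j => decide (nfgKey c arr j < nfgKey c arr m))
      · -- popped now: the scan up to m finds m first
        have hjS : j ∈ nfgS c arr m := List.takeWhile_sublist _ |>.subset hT
        have hkey : nfgKey c arr j < nfgKey c arr m := by
          simpa using List.mem_takeWhile_imp hT
        rw [if_pos hT]
        show nfgG c arr (m+1) j = arr.getD m 0
        unfold nfgG
        rw [hsplit, nfgScan_append_fail c arr _ _ _ (hfailpre hjS)]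
        simp only [nfgScan]
        rw [if_pos (by simpa [nfgKey] using hkey)]
      · rw [if_neg hT]
        show nfgG c arr (m+1) j = nfgG c arr m j
        unfold nfgG
        rw [hsplit]
        by_cases hjS : j ∈ nfgS c arr m
        · -- survived: key m is not greater, and nothing before m was greater either
          have hge : nfgKey c arr m ≤ nfgKey c arr j := by
            have hsplit2 := List.takeWhile_append_dropWhile
              (p := fun j => decide (nfgKey c arr j < nfgKey c arr m)) (l := nfgS c arr m)
            rw [← hsplit2] at hjS
            rcases List.mem_append.mp hjS with h | h
            · exact absurd h hT
            · exact nfg_dropWhile_ge c arr _ _ (nfgS_pairwise c arr m) j h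
          rw [nfgScan_append_fail c arr _ _ _ (hfailpre (by
            have hsplit2 := List.takeWhile_append_dropWhile
              (p := fun j => decide (nfgKey c arr j < nfgKey c arr m)) (l := nfgS c arr m)
            exact hjS))]
          simp only [nfgScan]
          rw [if_neg (by simp only [nfgKey] at hge ⊢; omega)]
          have h0 := nfgScan_append_fail c arr (nfgKey c arr j)
            (List.range' (j+1) (m - (j+1))) [] (hfailpre hjS)
          rw [List.append_nil] at h0
          rw [h0]
          rfl
        · -- already resolved earlier: the first hit is in the common prefix
          obtain ⟨l, h1, h2, h3⟩ := nfgS_complete c arr m j hjn hjS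
          exact nfgScan_append_found c arr _ _ _
            ⟨l, List.mem_range'_1.mpr ⟨by omega, by omega⟩, by simpa [nfgKey] using h3⟩
    · -- j ≥ m: both scans are over the empty range
      have h1 : m - (j+1) = 0 := by omega
      have h2 : m + 1 - (j+1) = 0 := by omega
      have hT : j ∉ (nfgS c arr m).takeWhile
          (fun j => decide (nfgKey c arr j < nfgKey c arr m)) := by
        intro h
        have := nfgS_lt c arr m j (List.takeWhile_sublist _ |>.subset h); omega
      rw [if_neg hT]
      show nfgG c arr (m+1) j = nfgG c arr m j
      unfold nfgG
      rw [h1, h2]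

-- ===== VERDICT (by name: the statement is the Claim_ definition above) =====
theorem nextFreqGreater_spec : Claim_equal_nextFreqGreater := by
  intro arr _
  unfold Spec_nextFreqGreater nextFreqGreater nextFreqGreater_alt
  dsimp only
  rw [nfg_inv (fun x => (PySem.Dict.counter arr).getD x 0) arr arr.length arr.length le_rfl]
  rfl
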